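-- pv_equiv track=rewrite | github.com/deepzzzzzzzzz/ProgrammingSet1 | 7.py | count_jokes
-- ===== SOURCE A (Python) =====
-- def count_jokes(events):
--     joke_count = 0
--     joke_map = {}
--     for month, day in events:
--         try:
--             base = int(str(day), month)
--             if base not in joke_map:
--                 joke_map[base] = 1
--             else:
--                 joke_map[base] += 1
--         except ValueError:
--             continue
--     for count in joke_map.values():
--         if count > 1:
--             joke_count += count * (count - 1) // 2
--     return joke_count
-- ===== SOURCE B (Python) =====
-- def count_jokes(events):
--     joke_count = 0
--     seen = {}
--     for month, day in events:
--         try: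
--             base = int(str(day), month)
--         except ValueError:
--             continue
--         prev = seen.get(base, 0)
--         joke_count += prev
--         seen[base] = prev + 1
--     return joke_count
-- ===== Notes on version B (the rewrite author's own statement) =====
-- stated objective: simpler
-- what changed: B counts matching pairs incrementally in a single pass (adding the number of previously seen equal bases at each event) instead of grouping into a dict first and then summing c*(c-1)//2 over the group sizes in a second loop.
import Mathlib
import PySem

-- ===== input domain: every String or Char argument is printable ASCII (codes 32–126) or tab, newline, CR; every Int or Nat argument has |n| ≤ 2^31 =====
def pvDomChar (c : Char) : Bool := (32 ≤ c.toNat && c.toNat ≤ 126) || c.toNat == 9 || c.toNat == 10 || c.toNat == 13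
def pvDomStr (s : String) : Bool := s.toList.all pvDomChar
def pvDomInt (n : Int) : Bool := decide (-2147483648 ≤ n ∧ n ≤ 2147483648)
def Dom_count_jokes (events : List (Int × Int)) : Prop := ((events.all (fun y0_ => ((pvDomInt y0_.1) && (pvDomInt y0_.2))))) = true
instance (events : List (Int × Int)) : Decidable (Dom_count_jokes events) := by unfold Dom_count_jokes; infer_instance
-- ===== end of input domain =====

-- B counts equal-base pairs incrementally in one pass instead of grouping into a dict then summing c*(c-1)//2 over group sizes.


-- ===== PORT A =====
def count_jokes (events : List (Int × Int)) : Int :=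
  (events.foldl (fun jm e =>
      match PySem.Int.ofStrBase? (PySem.Int.toStr e.2) e.1 with
      | none => jm                                        -- except ValueError: continue
      | some base =>
        if !jm.contains base then jm.insert base 1
        else jm.modify base 0 (· + 1))
    (PySem.Dict.empty : PySem.Dict Int Int)).values.foldl
    (fun jc c => if c > 1 then jc + PySem.Int.floordiv (c * (c - 1)) 2 else jc) 0

-- ===== PORT B =====
def count_jokes_alt (events : List (Int × Int)) : Int :=
  (events.foldl (fun s e =>
      match PySem.Int.ofStrBase? (PySem.Int.toStr e.2) e.1 with
      | none => s                                         -- except ValueError: continue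
      | some base =>
        (s.1 + s.2.getD base 0, s.2.insert base (s.2.getD base 0 + 1)))
    ((0 : Int), (PySem.Dict.empty : PySem.Dict Int Int))).1

-- ===== PRECONDITION & SPEC =====
def Spec_count_jokes (events : List (Int × Int)) (out : Int) : Prop := out = count_jokes_alt events
instance (events : List (Int × Int)) (out : Int) : Decidable (Spec_count_jokes events out) := by unfold Spec_count_jokes; infer_instance

-- ===== CLAIM (what is proved, stated in full; the proofs are below) =====
def Claim_equal_count_jokes : Prop := ∀ (events : List (Int × Int)), Dom_count_jokes events → Spec_count_jokes events (count_jokes events)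

-- ===== LEMMAS AND PROOFS =====

-- the list of successfully parsed bases, in event order
def pvBases (events : List (Int × Int)) : List Int :=
  events.filterMap (fun e => PySem.Int.ofStrBase? (PySem.Int.toStr e.2) e.1)

-- number of equal pairs, counted by suffix occurrences
def pvPairs : List Int → Int
  | [] => 0
  | x :: xs => (xs.count x : Int) + pvPairs xs

-- B's running pair count relative to the already-processed prefix p
def pvPairsAux : List Int → List Int → Int
  | _, [] => 0
  | p, x :: xs => (p.count x : Int) + pvPairsAux (p ++ [x]) xs

-- the per-group term of A's second loop
def pvTerm (c : Int) : Int := if c > 1 then PySem.Int.floordiv (c * (c - 1)) 2 else 0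

-- both event loops are a fold over the parsed bases (the ValueError branch skips)
lemma pvFoldl_skip {γ : Type} (g : γ → Int → γ) (l : List (Int × Int)) (init : γ) :
    l.foldl (fun acc e =>
        match PySem.Int.ofStrBase? (PySem.Int.toStr e.2) e.1 with
        | none => acc
        | some base => g acc base) init
      = (pvBases l).foldl g init := by
  induction l generalizing init with
  | nil => rfl
  | cons e t ih =>
    simp only [List.foldl_cons, pvBases, List.filterMap_cons]
    cases PySem.Int.ofStrBase? (PySem.Int.toStr e.2) e.1 <;> simp [ih, pvBases]

lemma pvModify_eq_insert (d : PySem.Dict Int Int) (k d0 : Int) (f : Int → Int) :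
    d.modify k d0 f = d.insert k (f (d.getD k d0)) := by
  simp [PySem.Dict.modify, PySem.Dict.insert, PySem.Dict.getD]

lemma pvA_dict (l : List Int) :
    l.foldl (fun jm base => if !jm.contains base then jm.insert base 1
                            else jm.modify base 0 (· + 1)) PySem.Dict.empty
      = PySem.Dict.counter l := by
  have hfun : (fun (jm : PySem.Dict Int Int) (base : Int) =>
      if !jm.contains base then jm.insert base 1 else jm.modify base 0 (· + 1))
      = fun d x => d.insert x (d.getD x 0 + 1) := by
    funext d x
    by_cases h : d.contains x
    · simp [h, pvModify_eq_insert]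
    · have h0 : d.getD x 0 = 0 :=
        PySem.Dict.getD_of_not_contains d 0 (by simpa using h)
      simp [h, h0]
  rw [hfun, PySem.Dict.foldl_insert_getD_add_one_eq_counter]

lemma pvB_fold (l : List Int) (p : List Int) (a : Int) :
    (l.foldl (fun (s : Int × PySem.Dict Int Int) base =>
        (s.1 + s.2.getD base 0, s.2.insert base (s.2.getD base 0 + 1)))
      (a, PySem.Dict.counter p)).1
      = a + pvPairsAux p l := by
  induction l generalizing p a with
  | nil => simp [pvPairsAux]
  | cons x xs ih =>
    have hd : (PySem.Dict.counter p).insert x ((PySem.Dict.counter p).getD x 0 + 1)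
        = PySem.Dict.counter (p ++ [x]) := by
      rw [PySem.Dict.counter_append_singleton, pvModify_eq_insert]
    simp only [List.foldl_cons]
    rw [show ((a, PySem.Dict.counter p).1 + (PySem.Dict.counter p).getD x 0,
             (PySem.Dict.counter p).insert x ((PySem.Dict.counter p).getD x 0 + 1))
          = (a + (p.count x : Int), PySem.Dict.counter (p ++ [x])) by
        rw [← hd]; simp [PySem.Dict.getD_counter]]
    rw [ih]
    simp [pvPairsAux]; ring

lemma pvCount_ite_sum (x : Int) (xs : List Int) :
    (xs.map (fun y => if y = x then (1 : Int) else 0)).sum = (xs.count x : Int) := by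
  rw [show (fun y => if y = x then (1 : Int) else 0)
      = (fun y => if (y == x) = true then (1 : Int) else 0) by funext y; simp]
  rw [PySem.List.sum_map_ite_one_zero]
  simp [List.count]

lemma pvPairsAux_eq (l : List Int) : ∀ p : List Int,
    pvPairsAux p l = (l.map (fun y => (p.count y : Int))).sum + pvPairs l := by
  induction l with
  | nil => intro p; simp [pvPairsAux, pvPairs]
  | cons x xs ih =>
    intro p
    simp only [pvPairsAux, pvPairs, ih (p ++ [x]), List.map_cons, List.sum_cons]
    have hcnt : ∀ y, ((p ++ [x]).count y : Int)
        = (p.count y : Int) + (if y = x then 1 else 0) := by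
      intro y
      by_cases h : y = x
      · simp [List.count_append, h]
      · simp [List.count_append, h, Ne.symm h]
    rw [List.map_congr_left (fun y _ => hcnt y), PySem.List.sum_map_add_int,
      pvCount_ite_sum]
    ring

-- bumping a function at one point of a nodup list shifts the sum by the bump
lemma pvSum_bump (S : List Int) (hS : S.Nodup) (x : Int) (hx : x ∈ S)
    (F G : Int → Int) (d : Int) (hne : ∀ k, k ≠ x → G k = F k) (heq : G x = F x + d) :
    (S.map G).sum = (S.map F).sum + d := by
  induction S with
  | nil => cases hx
  | cons s S' ih =>
    rcases List.mem_cons.mp hx with h | h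
    · subst h
      have hnot : x ∉ S' := (List.nodup_cons.mp hS).1
      have : S'.map G = S'.map F :=
        List.map_congr_left (fun k hk => hne k (fun hkx => hnot (hkx ▸ hk)))
      simp [this, heq]; ring
    · have hsx : s ≠ x := fun hsx => (List.nodup_cons.mp hS).1 (hsx ▸ h)
      simp only [List.map_cons, List.sum_cons, ih (List.nodup_cons.mp hS).2 h]
      rw [hne s hsx]; ring

lemma pvTerm_succ (n : Nat) : pvTerm ((n : Int) + 1) = pvTerm (n : Int) + (n : Int) := by
  unfold pvTerm
  rcases Nat.eq_zero_or_pos n with h | h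
  · subst h; norm_num [PySem.Int.floordiv]
  · have h1 : (1 : Int) < (n : Int) + 1 := by exact_mod_cast Nat.lt_add_of_pos_left h
    rw [if_pos h1]
    by_cases h2 : (1 : Int) < (n : Int)
    · rw [if_pos h2,
        PySem.Int.floordiv_eq_ediv_of_pos (a := ((n : Int) + 1) * ((n : Int) + 1 - 1)) (by norm_num),
        PySem.Int.floordiv_eq_ediv_of_pos (a := (n : Int) * ((n : Int) - 1)) (by norm_num)]
      have hexp : ((n : Int) + 1) * ((n : Int) + 1 - 1) = (n : Int) * ((n : Int) - 1) + 2 * (n : Int) := by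
        ring
      omega
    · have hn1 : n = 1 := by omega
      subst hn1; norm_num [PySem.Int.floordiv]

lemma pvSum_terms (l : List Int) : ∀ S : List Int, S.Nodup → (∀ v ∈ l, v ∈ S) →
    (S.map (fun k => pvTerm (l.count k : Int))).sum = pvPairs l := by
  induction l with
  | nil =>
    intro S _ _
    simp [pvPairs, pvTerm]
  | cons x xs ih =>
    intro S hS hsub
    have hx : x ∈ S := hsub x (by simp)
    rw [pvSum_bump S hS x hx
        (fun k => pvTerm (xs.count k : Int))
        (fun k => pvTerm ((x :: xs).count k : Int))
        ((xs.count x : Int))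
        (fun k hk => by
          show pvTerm (((x :: xs).count k : Nat) : Int) = pvTerm ((xs.count k : Nat) : Int)
          have : (x :: xs).count k = xs.count k := by
            simp [Ne.symm hk]
          rw [this])
        (by
          show pvTerm (((x :: xs).count x : Nat) : Int)
              = pvTerm ((xs.count x : Nat) : Int) + ((xs.count x : Nat) : Int)
          have : (x :: xs).count x = xs.count x + 1 := by simp
          rw [this]; push_cast; exact pvTerm_succ (xs.count x))]
    rw [ih S hS (fun v hv => hsub v (by simp [hv]))]
    simp [pvPairs]; ring

lemma pvA_eq (events : List (Int × Int)) :
    count_jokes events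
      = ((PySem.Set.ofList (pvBases events)).map
          (fun k => pvTerm ((pvBases events).count k : Int))).sum := by
  unfold count_jokes
  rw [pvFoldl_skip, pvA_dict,
    PySem.List.foldl_congr_mem _ _ (fun jc c => jc + pvTerm c) _
      (fun acc x _ => by unfold pvTerm; by_cases h : x > 1 <;> simp [h]),
    PySem.List.foldl_add]
  have hv : (PySem.Dict.counter (pvBases events)).values
      = (PySem.Set.ofList (pvBases events)).map
          (fun k => ((pvBases events).count k : Int)) := by
    show (PySem.Dict.counter (pvBases events)).items.map Prod.snd = _
    rw [PySem.Dict.items_counter, List.map_map]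
    rfl
  rw [hv, List.map_map, zero_add]
  rfl

lemma pvB_eq (events : List (Int × Int)) :
    count_jokes_alt events = pvPairs (pvBases events) := by
  unfold count_jokes_alt
  rw [pvFoldl_skip,
    show ((0 : Int), (PySem.Dict.empty : PySem.Dict Int Int))
      = ((0 : Int), PySem.Dict.counter ([] : List Int)) from rfl,
    pvB_fold, pvPairsAux_eq]
  simp

-- ===== VERDICT (by name: the statement is the Claim_ definition above) =====
theorem count_jokes_spec : Claim_equal_count_jokes := by
  intro events _
  show count_jokes events = count_jokes_alt events
  rw [pvA_eq, pvB_eq]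
  exact pvSum_terms (pvBases events) (PySem.Set.ofList (pvBases events))
    (PySem.Set.nodup_ofList _) (fun v hv => (PySem.Set.mem_ofList _ _).mpr hv)
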